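-- pv_equiv track=rewrite | github.com/oh2468/daily-programmer | challenges/303_Ricochet.py | bounce
-- ===== SOURCE A (Python) =====
-- def bounce(h, w, v):
--     hi = wi = 0
--     corners = {(0, w): "UR", (h, w): "LR", (h, 0): "LL"}
--     moves = 0
--     grid_bounces = 0
--     dir_h = dir_w = 1
--     while (hi, wi) not in corners:
--         moves += 1
--         hi += dir_h
--         wi += dir_w
--         if hi == 0 or hi == h:
--             dir_h = -dir_h
--             grid_bounces += 1
--         if wi == 0 or wi == w:
--             dir_w = -dir_w
--             grid_bounces += 1
--     grid_bounces -= 2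
--     t = moves // v
--     return f"{corners[(hi, wi)]} {grid_bounces} {t}"
-- ===== SOURCE B (Python) =====
-- def bounce(h, w, v):
--     # closed form: the ball reaches a corner after lcm(h, w) moves
--     a, b = h, w
--     while b:
--         a, b = b, a % b
--     moves = h // a * w
--     bh = moves // h
--     bw = moves // w
--     corner = ("LR" if bh % 2 else "UR") if bw % 2 else "LL"
--     return f"{corner} {bh + bw - 2} {moves // v}"
-- ===== Notes on version B (the rewrite author's own statement) =====
-- stated objective: faster
-- what changed: Replaces the step-by-step ball simulation (a while loop running lcm(h,w) iterations) with a closed form: Euclid's gcd gives moves = lcm(h,w), bounces = lcm/h + lcm/w - 2, and the corner is read off the parities of lcm/h and lcm/w.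
-- outside the precondition, e.g. on bounce(0, 3, 1): A returns 'LL -2 0', B raises ZeroDivisionError; on bounce(5, 0, 1): A returns 'UR -2 0', B raises ZeroDivisionError; on bounce(2, 3, 0): A raises ZeroDivisionError, B raises ZeroDivisionError
import Mathlib
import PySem

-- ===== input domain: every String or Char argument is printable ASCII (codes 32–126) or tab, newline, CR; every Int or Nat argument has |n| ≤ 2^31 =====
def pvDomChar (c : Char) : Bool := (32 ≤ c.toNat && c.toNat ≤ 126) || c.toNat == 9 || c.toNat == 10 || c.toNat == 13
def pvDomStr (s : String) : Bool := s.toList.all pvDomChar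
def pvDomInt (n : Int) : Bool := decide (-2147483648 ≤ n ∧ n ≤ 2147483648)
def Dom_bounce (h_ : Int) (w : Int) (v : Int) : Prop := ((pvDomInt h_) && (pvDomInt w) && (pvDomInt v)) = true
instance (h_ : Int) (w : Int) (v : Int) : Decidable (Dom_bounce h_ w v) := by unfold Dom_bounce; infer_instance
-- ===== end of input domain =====

-- B replaces A's step-by-step simulation of the ball (O(lcm(h,w)) loop) by the closed form:
-- moves = lcm(h,w) via Euclid's gcd, bounces = lcm/h + lcm/w - 2, corner from the parities of lcm/h and lcm/w.

-- ===== PORT A =====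
-- the while loop, made total with fuel (the fuel passed by `bounce` is proven sufficient under Pre_;
-- on fuel exhaustion — only reachable outside Pre_, where the Python loops forever — it returns the current state)
def bounceLoop (corners : PySem.Dict (Int × Int) String) (h_ : Int) (w : Int) :
    Nat → Int → Int → Int → Int → Int → Int → Int × Int × Int × Int
  | 0, hi, wi, _, _, moves, gb => (hi, wi, moves, gb)
  | fuel+1, hi, wi, dh, dw, moves, gb =>
    if corners.contains (hi, wi) then (hi, wi, moves, gb)
    else
      let moves' := moves + 1
      let hi' := hi + dh
      let wi' := wi + dw
      let dh' := if hi' = 0 ∨ hi' = h_ then -dh else dh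
      let gb1 := if hi' = 0 ∨ hi' = h_ then gb + 1 else gb
      let dw' := if wi' = 0 ∨ wi' = w then -dw else dw
      let gb2 := if wi' = 0 ∨ wi' = w then gb1 + 1 else gb1
      bounceLoop corners h_ w fuel hi' wi' dh' dw' moves' gb2

def bounce (h_ : Int) (w : Int) (v : Int) : String :=
  let corners : PySem.Dict (Int × Int) String :=
    ((PySem.Dict.empty.insert (0, w) "UR").insert (h_, w) "LR").insert (h_, 0) "LL"
  let r := bounceLoop corners h_ w ((h_ * w).toNat + 1) 0 0 1 1 0 0
  let gb := r.2.2.2 - 2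
  let t := PySem.Int.floordiv r.2.2.1 v
  -- corners[(hi, wi)]: KeyError is unreachable when the loop exited normally; getD "" is the total form
  ((corners.get? (r.1, r.2.1)).getD "") ++ " " ++ PySem.Int.toStr gb ++ " " ++ PySem.Int.toStr t

-- ===== PORT B =====
-- `while b: a, b = b, a % b` (Euclid's algorithm from Source B)
def bounceGcd (a : Int) (b : Int) : Int :=
  if hb : b = 0 then a else bounceGcd b (PySem.Int.mod a b)
termination_by b.natAbs
decreasing_by
  rcases lt_trichotomy b 0 with hneg | h0 | hpos
  · have := PySem.Int.mod_neg_bounds (a := a) hneg; omega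
  · exact absurd h0 hb
  · have h1 := PySem.Int.mod_nonneg (a := a) hpos
    have h2 := PySem.Int.mod_lt (a := a) hpos
    omega

def bounce_alt (h_ : Int) (w : Int) (v : Int) : String :=
  let g := bounceGcd h_ w
  let moves := PySem.Int.floordiv h_ g * w
  let bh := PySem.Int.floordiv moves h_
  let bw := PySem.Int.floordiv moves w
  let corner := if PySem.Int.mod bw 2 ≠ 0 then (if PySem.Int.mod bh 2 ≠ 0 then "LR" else "UR") else "LL"
  corner ++ " " ++ PySem.Int.toStr (bh + bw - 2) ++ " " ++ PySem.Int.toStr (PySem.Int.floordiv moves v)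

-- ===== PRECONDITION & SPEC =====
-- Pre_ excludes v = 0 (A raises ZeroDivisionError), negative h_ or w (A's while loop never
-- terminates), and h_ = 0 or w = 0, where A returns a degenerate value ("LL -2 0" with a
-- negative bounce count) that is an accident of the start cell already being a corner.
def Pre_bounce (h_ : Int) (w : Int) (v : Int) : Prop := 1 ≤ h_ ∧ 1 ≤ w ∧ v ≠ 0
instance (h_ : Int) (w : Int) (v : Int) : Decidable (Pre_bounce h_ w v) := by unfold Pre_bounce; infer_instance
def pvWitness_bounce : Int × Int × Int := (3, 5, 2)

def Spec_bounce (h_ : Int) (w : Int) (v : Int) (out : String) : Prop := out = bounce_alt h_ w v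
instance (h_ : Int) (w : Int) (v : Int) (out : String) : Decidable (Spec_bounce h_ w v out) := by unfold Spec_bounce; infer_instance

-- ===== CLAIM (what is proved, stated in full; the proofs are below) =====
def Claim_equal_bounce : Prop := ∀ (h_ : Int) (w : Int) (v : Int), Dom_bounce h_ w v → Pre_bounce h_ w v → Spec_bounce h_ w v (bounce h_ w v)

-- ===== LEMMAS AND PROOFS =====

-- position of the ball along one axis after m moves (triangle wave of period 2h)
def posF (h m : Int) : Int := if m % (2*h) ≤ h then m % (2*h) else 2*h - m % (2*h)
-- direction along one axis at the start of move m+1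
def dirF (h m : Int) : Int := if m % (2*h) < h then 1 else -1

theorem posF_boundary (h m : Int) (hh : 1 ≤ h) :
    (posF h m = 0 ∨ posF h m = h) ↔ h ∣ m := by
  have h0 : 0 ≤ m % (2*h) := Int.emod_nonneg m (by omega)
  have h1 : m % (2*h) < 2*h := Int.emod_lt_of_pos m (by omega)
  have heq : 2*h * (m / (2*h)) + m % (2*h) = m := Int.ediv_add_emod m (2*h)
  constructor
  · intro hp
    have hr : m % (2*h) = 0 ∨ m % (2*h) = h := by
      unfold posF at hp; split_ifs at hp <;> omega
    rcases hr with hr | hr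
    · exact ⟨2 * (m / (2*h)), by rw [show h * (2 * (m / (2*h))) = 2*h*(m/(2*h)) by ring]; omega⟩
    · exact ⟨2 * (m / (2*h)) + 1, by rw [show h * (2 * (m / (2*h)) + 1) = 2*h*(m/(2*h)) + h by ring]; omega⟩
  · rintro ⟨k, rfl⟩
    have : (h * k) % (2*h) = h * (k % 2) := by
      rw [mul_comm 2 h]; exact Int.mul_emod_mul_of_pos k 2 (by omega)
    have hk2 : k % 2 = 0 ∨ k % 2 = 1 := by omega
    unfold posF; rcases hk2 with hk | hk <;> simp [this, hk] <;> omega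

theorem posF_step (h m : Int) (hh : 1 ≤ h) :
    posF h (m + 1) = posF h m + dirF h m := by
  have h0 : 0 ≤ m % (2*h) := Int.emod_nonneg m (by omega)
  have h1 : m % (2*h) < 2*h := Int.emod_lt_of_pos m (by omega)
  have hs : (m + 1) % (2*h) = if m % (2*h) + 1 = 2*h then 0 else m % (2*h) + 1 := by
    rw [Int.add_emod, Int.emod_eq_of_lt (by omega) (by omega : (1:Int) < 2*h)]
    split_ifs with h
    · rw [h, Int.emod_self]
    · exact Int.emod_eq_of_lt (by omega) (by omega)
  unfold posF dirF
  rw [hs]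
  split_ifs <;> omega

theorem dirF_step (h m : Int) (hh : 1 ≤ h) :
    dirF h (m + 1) = if posF h (m + 1) = 0 ∨ posF h (m + 1) = h then -(dirF h m) else dirF h m := by
  have h0 : 0 ≤ m % (2*h) := Int.emod_nonneg m (by omega)
  have h1 : m % (2*h) < 2*h := Int.emod_lt_of_pos m (by omega)
  have hs : (m + 1) % (2*h) = if m % (2*h) + 1 = 2*h then 0 else m % (2*h) + 1 := by
    rw [Int.add_emod, Int.emod_eq_of_lt (by omega) (by omega : (1:Int) < 2*h)]
    split_ifs with h
    · rw [h, Int.emod_self]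
    · exact Int.emod_eq_of_lt (by omega) (by omega)
  unfold posF dirF
  rw [hs]
  split_ifs <;> omega

theorem ediv_succ (h m : Int) (hh : 1 ≤ h) :
    (m + 1) / h = m / h + (if h ∣ (m + 1) then 1 else 0) := by
  have h0 : 0 ≤ m % h := Int.emod_nonneg m (by omega)
  have h1 : m % h < h := Int.emod_lt_of_pos m (by omega)
  have heq : h * (m / h) + m % h = m := Int.ediv_add_emod m h
  have hsplit : m + 1 = (m % h + 1) + (m / h) * h := by rw [mul_comm (m / h) h]; omega
  have hdiv : (m + 1) / h = (m % h + 1) / h + m / h := by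
    rw [hsplit, Int.add_mul_ediv_right _ _ (by omega : h ≠ 0)]
  split_ifs with hd
  · -- h ∣ m + 1 → m % h = h - 1
    have hr : m % h = h - 1 := by
      by_contra hne
      obtain ⟨k, hk⟩ := hd
      have hd2 : h ∣ (m % h + 1) := ⟨k - m / h, by rw [mul_sub]; omega⟩
      have := Int.le_of_dvd (by omega) hd2
      omega
    rw [hdiv, hr, show h - 1 + 1 = h by ring, Int.ediv_self (by omega)]
    omega
  · have hr : m % h ≠ h - 1 := by
      intro hr
      exact hd ⟨m / h + 1, by rw [mul_add, mul_one]; omega⟩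
    rw [hdiv, Int.ediv_eq_zero_of_lt (by omega) (by omega)]
    omega

theorem posF_of_dvd (h m : Int) (hh : 1 ≤ h) (hd : h ∣ m) :
    posF h m = h * ((m / h) % 2) := by
  obtain ⟨k, rfl⟩ := hd
  rw [Int.mul_ediv_cancel_left k (by omega : h ≠ 0)]
  have : (h * k) % (2*h) = h * (k % 2) := by
    rw [mul_comm 2 h]; exact Int.mul_emod_mul_of_pos k 2 (by omega)
  have hk2 : k % 2 = 0 ∨ k % 2 = 1 := by omega
  unfold posF; rcases hk2 with hk | hk <;> simp [this, hk] <;> omega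

theorem corners_contains (h w p q : Int) :
    ((((PySem.Dict.empty.insert ((0:Int), w) "UR").insert (h, w) "LR").insert (h, 0) "LL").contains (p, q)) = true
    ↔ ((p = 0 ∧ q = w) ∨ (p = h ∧ q = w) ∨ (p = h ∧ q = 0)) := by
  simp [PySem.Dict.contains_insert, PySem.Dict.contains_empty]
  tauto

theorem bounceLoop_inv (h_ w M : Int) (hh : 1 ≤ h_) (hw : 1 ≤ w)
    (hM0 : 0 < M) (hMh : h_ ∣ M) (hMw : w ∣ M)
    (hmin : ∀ m : Int, 0 < m → m < M → ¬(h_ ∣ m ∧ w ∣ m))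
    (hpar : ¬((M / h_) % 2 = 0 ∧ (M / w) % 2 = 0)) :
    ∀ (fuel : Nat) (m : Int), 0 ≤ m → m ≤ M → (M - m).toNat < fuel →
      bounceLoop (((PySem.Dict.empty.insert ((0:Int), w) "UR").insert (h_, w) "LR").insert (h_, 0) "LL")
        h_ w fuel (posF h_ m) (posF w m) (dirF h_ m) (dirF w m) m (m / h_ + m / w)
      = (posF h_ M, posF w M, M, M / h_ + M / w) := by
  intro fuel
  induction fuel with
  | zero => intro m _ _ hf; omega
  | succ f ih =>
    intro m hm0 hmM hf
    by_cases hEnd : m = M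
    · subst hEnd
      have hph := (posF_boundary h_ m hh).2 hMh
      have hpw := (posF_boundary w m hw).2 hMw
      have hph' := posF_of_dvd h_ m hh hMh
      have hpw' := posF_of_dvd w m hw hMw
      have hcont : ((((PySem.Dict.empty.insert ((0:Int), w) "UR").insert (h_, w) "LR").insert (h_, 0) "LL").contains (posF h_ m, posF w m)) = true := by
        rw [corners_contains]
        rcases hph with h1 | h1 <;> rcases hpw with h2 | h2
        · exfalso; apply hpar; constructor <;> [skip; skip]
          · have : h_ * ((m / h_) % 2) = 0 := by omega
            have h2' : (m / h_) % 2 = 0 ∨ (m / h_) % 2 = 1 := by omega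
            rcases h2' with e | e
            · exact e
            · rw [e] at this; omega
          · have : w * ((m / w) % 2) = 0 := by omega
            have h2' : (m / w) % 2 = 0 ∨ (m / w) % 2 = 1 := by omega
            rcases h2' with e | e
            · exact e
            · rw [e] at this; omega
        · tauto
        · tauto
        · tauto
      simp only [bounceLoop, hcont, if_true]
    · have hmM' : m < M := by omega
      have hcont : ((((PySem.Dict.empty.insert ((0:Int), w) "UR").insert (h_, w) "LR").insert (h_, 0) "LL").contains (posF h_ m, posF w m)) = false := by
        rw [Bool.eq_false_iff]
        rw [show (((((PySem.Dict.empty.insert ((0:Int), w) "UR").insert (h_, w) "LR").insert (h_, 0) "LL").contains (posF h_ m, posF w m)) ≠ true) ↔ ¬((((PySem.Dict.empty.insert ((0:Int), w) "UR").insert (h_, w) "LR").insert (h_, 0) "LL").contains (posF h_ m, posF w m) = true) from Iff.rfl, corners_contains]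
        intro hk
        have hdh : h_ ∣ m := (posF_boundary h_ m hh).1 (by tauto)
        have hdw : w ∣ m := (posF_boundary w m hw).1 (by tauto)
        by_cases hz : m = 0
        · subst hz
          have ph0 : posF h_ 0 = 0 := by unfold posF; rw [Int.zero_emod]; split_ifs <;> omega
          have pw0 : posF w 0 = 0 := by unfold posF; rw [Int.zero_emod]; split_ifs <;> omega
          rw [ph0, pw0] at hk
          rcases hk with ⟨h1, h2⟩ | ⟨h1, h2⟩ | ⟨h1, h2⟩ <;> omega
        · exact hmin m (by omega) hmM' ⟨hdh, hdw⟩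
      simp only [bounceLoop, hcont, Bool.false_eq_true, if_false]
      rw [← posF_step h_ m hh, ← posF_step w m hw, ← dirF_step h_ m hh, ← dirF_step w m hw]
      have hgb : (if posF w (m + 1) = 0 ∨ posF w (m + 1) = w then
        (if posF h_ (m + 1) = 0 ∨ posF h_ (m + 1) = h_ then m / h_ + m / w + 1 else m / h_ + m / w) + 1
      else if posF h_ (m + 1) = 0 ∨ posF h_ (m + 1) = h_ then m / h_ + m / w + 1 else m / h_ + m / w)
          = (m + 1) / h_ + (m + 1) / w := by
        simp only [posF_boundary h_ (m+1) hh, posF_boundary w (m+1) hw, ediv_succ h_ m hh, ediv_succ w m hw]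
        split_ifs <;> omega
      rw [hgb]
      exact ih (m+1) (by omega) (by omega) (by omega)

theorem bounceGcd_eq : ∀ (n : Nat) (a b : Int), b.natAbs ≤ n → 0 ≤ a → 0 ≤ b →
    bounceGcd a b = (Int.gcd a b : Int) := by
  intro n
  induction n with
  | zero =>
    intro a b hn ha hb
    have hb0 : b = 0 := by omega
    subst hb0
    rw [bounceGcd]
    simp [Int.natAbs_of_nonneg ha]
  | succ k ih =>
    intro a b hn ha hb
    rw [bounceGcd]
    split_ifs with h0
    · subst h0; simp [Int.natAbs_of_nonneg ha]
    · have hbpos : 0 < b := by omega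
      have hmod : PySem.Int.mod a b = a % b := PySem.Int.mod_eq_emod_of_pos hbpos
      have h1 : 0 ≤ a % b := Int.emod_nonneg a h0
      have h2 : a % b < b := Int.emod_lt_of_pos a hbpos
      rw [hmod, ih b (a % b) (by omega) hb h1, show (b.gcd (a % b)) = ((a % b).gcd b) from Int.gcd_comm b (a % b), Int.gcd_emod]

theorem bounce_eq (h_ w v : Int) (hh : 1 ≤ h_) (hw : 1 ≤ w) (hv : v ≠ 0) :
    bounce h_ w v = bounce_alt h_ w v := by
  have hgnat : 0 < Int.gcd h_ w := Int.gcd_pos_of_ne_zero_left w (by omega)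
  have hg0 : 0 < (Int.gcd h_ w : Int) := by exact_mod_cast hgnat
  set g : Int := (Int.gcd h_ w : Int) with hgdef
  obtain ⟨a, hA⟩ : g ∣ h_ := hgdef ▸ Int.gcd_dvd_left h_ w
  obtain ⟨b, hB⟩ : g ∣ w := hgdef ▸ Int.gcd_dvd_right h_ w
  have ha0 : 0 < a := by
    by_contra hc
    have := mul_nonpos_of_nonneg_of_nonpos hg0.le (by omega : a ≤ 0)
    omega
  have hb0 : 0 < b := by
    by_contra hc
    have := mul_nonpos_of_nonneg_of_nonpos hg0.le (by omega : b ≤ 0)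
    omega
  have hdivg : h_ / g = a := by
    nth_rewrite 1 [hA]
    rw [Int.mul_ediv_cancel_left _ (ne_of_gt hg0)]
  have hwdivg : w / g = b := by
    nth_rewrite 1 [hB]
    rw [Int.mul_ediv_cancel_left _ (ne_of_gt hg0)]
  have hMh : h_ ∣ a * w := ⟨b, by rw [hA, hB]; ring⟩
  have hMw : w ∣ a * w := ⟨a, by ring⟩
  have hM0 : 0 < a * w := mul_pos ha0 (by omega)
  have hMdh : a * w / h_ = b := by
    rw [show a * w = h_ * b from by rw [hA, hB]; ring, Int.mul_ediv_cancel_left _ (by omega)]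
  have hMdw : a * w / w = a := Int.mul_ediv_cancel _ (by omega)
  have hcop : Int.gcd a b = 1 := by
    have hq := Int.gcd_ediv_gcd_ediv_gcd (i := h_) (j := w) hgnat
    rw [← hgdef, hdivg, hwdivg] at hq
    exact hq
  have hpar : ¬(a * w / h_ % 2 = 0 ∧ a * w / w % 2 = 0) := by
    rw [hMdh, hMdw]
    rintro ⟨e1, e2⟩
    have d2b : (2:Int) ∣ b := Int.dvd_of_emod_eq_zero e1
    have d2a : (2:Int) ∣ a := Int.dvd_of_emod_eq_zero e2
    have h21 := Int.dvd_coe_gcd d2a d2b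
    rw [hcop] at h21
    norm_num at h21
  have hgM : g * (a * w) = h_ * w := by rw [hA]; ring
  have hlcm : (Int.lcm h_ w : Int) = a * w := by
    have hml : ((Int.gcd h_ w * Int.lcm h_ w : Nat) : Int) = ((h_.natAbs * w.natAbs : Nat) : Int) := by
      exact_mod_cast congrArg (Nat.cast : Nat → Int) (Int.gcd_mul_lcm h_ w)
    push_cast at hml
    rw [abs_of_nonneg (by omega : (0:Int) ≤ h_), abs_of_nonneg (by omega : (0:Int) ≤ w), ← hgdef] at hml
    apply mul_left_cancel₀ (ne_of_gt hg0)
    rw [hgM, hml]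
  have hmin : ∀ m : Int, 0 < m → m < a * w → ¬(h_ ∣ m ∧ w ∣ m) := by
    rintro m hm1 hm2 ⟨d1, d2⟩
    have hd := Int.coe_lcm_dvd d1 d2
    rw [hlcm] at hd
    have := Int.le_of_dvd hm1 hd
    omega
  have hMle : a * w ≤ h_ * w := by nlinarith [hg0, hM0]
  have hloop := bounceLoop_inv h_ w (a * w) hh hw hM0 hMh hMw hmin hpar
    ((h_ * w).toNat + 1) 0 le_rfl (by omega) (by omega)
  have hp0 : posF h_ 0 = 0 := by unfold posF; rw [Int.zero_emod]; split_ifs <;> omega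
  have hq0 : posF w 0 = 0 := by unfold posF; rw [Int.zero_emod]; split_ifs <;> omega
  have hd0 : dirF h_ 0 = 1 := by unfold dirF; rw [Int.zero_emod]; split_ifs <;> omega
  have he0 : dirF w 0 = 1 := by unfold dirF; rw [Int.zero_emod]; split_ifs <;> omega
  rw [hp0, hq0, hd0, he0, Int.zero_ediv, Int.zero_ediv] at hloop
  norm_num at hloop
  unfold bounce bounce_alt
  simp only []
  rw [bounceGcd_eq w.natAbs h_ w le_rfl (by omega) (by omega), ← hgdef]
  rw [PySem.Int.floordiv_eq_ediv_of_pos hg0, hdivg, hloop]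
  simp only []
  rw [PySem.Int.floordiv_eq_ediv_of_pos (by omega : (0:Int) < h_), PySem.Int.floordiv_eq_ediv_of_pos (by omega : (0:Int) < w), hMdh, hMdw]
  rw [posF_of_dvd h_ (a*w) hh hMh, posF_of_dvd w (a*w) hw hMw, hMdh, hMdw]
  rw [hMdh, hMdw] at hpar
  rw [show PySem.Int.mod a 2 = a % 2 from PySem.Int.mod_eq_emod_of_pos (by omega),
      show PySem.Int.mod b 2 = b % 2 from PySem.Int.mod_eq_emod_of_pos (by omega)]
  have hne1 : h_ ≠ 0 := by omega
  have hne2 : w ≠ 0 := by omega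
  rcases Int.emod_two_eq a with ea | ea <;> rcases Int.emod_two_eq b with eb | eb <;> rw [ea, eb]
  · exact absurd ⟨eb, ea⟩ hpar
  · simp [hne1]
  · simp [PySem.Dict.get?_insert, Ne.symm hne1, hne2]
  · simp [PySem.Dict.get?_insert, hne2]

-- ===== VERDICT (by name: the statement is the Claim_ definition above) =====
theorem bounce_spec : Claim_equal_bounce := by
  intro h_ w v _ hpre
  exact bounce_eq h_ w v hpre.1 hpre.2.1 hpre.2.2
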